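-- pv_equiv track=rewrite | github.com/Programmer-Bose/mtech-project | mmoea_drl_pp/mmoea-drl-final/core/encoding.py | unflatten_individual
-- ===== SOURCE A (Python) =====
-- def unflatten_individual(flattened):
--     """Convert flattened form back to list-of-lists"""
--     robots = []
--     temp = []
--     for t in flattened:
--         if t == -1:
--             robots.append(temp)
--             temp = []
--         else:
--             temp.append(t)
--     if temp:
--         robots.append(temp)
--     return robots
-- ===== SOURCE B (Python) =====
-- def unflatten_individual(flattened):
--     """Convert flattened form back to list-of-lists"""
--     if -1 in flattened:
--         i = flattened.index(-1)
--         return [flattened[:i]] + unflatten_individual(flattened[i + 1:])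
--     return [flattened] if flattened else []
-- ===== Notes on version B (the rewrite author's own statement) =====
-- stated objective: alternative
-- what changed: B is recursive: it finds the first -1 with list.index, emits the slice before it and recurses on the slice after it (base case: the whole list if nonempty), instead of A's single pass growing a temp accumulator element by element.
import Mathlib
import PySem

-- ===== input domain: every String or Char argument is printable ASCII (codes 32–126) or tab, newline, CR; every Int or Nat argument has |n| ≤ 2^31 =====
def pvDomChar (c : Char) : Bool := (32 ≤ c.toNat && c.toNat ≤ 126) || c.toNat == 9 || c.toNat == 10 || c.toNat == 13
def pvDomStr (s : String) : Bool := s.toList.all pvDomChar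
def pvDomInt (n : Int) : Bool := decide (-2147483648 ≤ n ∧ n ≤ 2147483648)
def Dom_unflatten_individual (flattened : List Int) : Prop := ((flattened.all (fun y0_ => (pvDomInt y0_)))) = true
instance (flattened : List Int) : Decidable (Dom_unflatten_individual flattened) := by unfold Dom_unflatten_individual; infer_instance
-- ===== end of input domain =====

-- B replaces A's single accumulator pass by a recursion on the first -1 (index + slices); proved equal (alternative decomposition, same result).

-- ===== PORT A =====
-- literal port of A: fold over the elements carrying (robots, temp), then 'if temp:' append
def unflatten_individual (flattened : List Int) : List (List Int) :=
  let st := flattened.foldl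
    (fun (st : List (List Int) × List Int) t =>
      if t = -1 then (st.1 ++ [st.2], []) else (st.1, st.2 ++ [t]))
    ([], [])
  if st.2 ≠ [] then st.1 ++ [st.2] else st.1

-- ===== PORT B =====
-- literal port of B: if -1 in flattened, split at its first index and recurse on the tail slice
def unflatten_individual_alt (flattened : List Int) : List (List Int) :=
  match h : PySem.List.index? flattened (-1) with
  | some i =>
      [PySem.List.slice flattened none (some (i : Int))]
        ++ unflatten_individual_alt (PySem.List.slice flattened (some ((i : Int) + 1)) none)
  | none => if flattened ≠ [] then [flattened] else []
termination_by flattened.length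
decreasing_by
  rw [PySem.List.index?_eq_idxOf?] at h
  have hi : i < flattened.length := List.idxOf?_eq_some_iff.mp h |>.1
  have : ((i : Int) + 1) = ((i + 1 : Nat) : Int) := by push_cast; ring
  rw [this, PySem.List.slice_from_natCast]
  simp
  omega

-- ===== PRECONDITION & SPEC =====
def Spec_unflatten_individual (flattened : List Int) (out : List (List Int)) : Prop := out = unflatten_individual_alt flattened
instance (flattened : List Int) (out : List (List Int)) : Decidable (Spec_unflatten_individual flattened out) := by unfold Spec_unflatten_individual; infer_instance

-- ===== CLAIM (what is proved, stated in full; the proofs are below) =====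
def Claim_equal_unflatten_individual : Prop := ∀ (flattened : List Int), Dom_unflatten_individual flattened → Spec_unflatten_individual flattened (unflatten_individual flattened)

-- ===== LEMMAS AND PROOFS =====

-- reference recursion: split ys on -1, temp = segment accumulated so far
def pvSplitAux : List Int → List Int → List (List Int)
  | [], temp => if temp ≠ [] then [temp] else []
  | t :: ts, temp => if t = -1 then temp :: pvSplitAux ts [] else pvSplitAux ts (temp ++ [t])

lemma pvA_eq (ys : List Int) : ∀ (acc : List (List Int)) (temp : List Int),
    (let st := ys.foldl
        (fun (st : List (List Int) × List Int) t =>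
          if t = -1 then (st.1 ++ [st.2], []) else (st.1, st.2 ++ [t]))
        (acc, temp)
     if st.2 ≠ [] then st.1 ++ [st.2] else st.1) = acc ++ pvSplitAux ys temp := by
  induction ys with
  | nil => intro acc temp; by_cases h : temp = [] <;> simp [pvSplitAux, h]
  | cons t ts ih =>
    intro acc temp
    by_cases h : t = -1
    · simpa [pvSplitAux, h] using (ih (acc ++ [temp]) [])
    · simpa [pvSplitAux, h] using (ih acc (temp ++ [t]))

lemma pvSplit_no_sep (ys : List Int) (h : (-1 : Int) ∉ ys) :
    ∀ temp, pvSplitAux ys temp = if temp ++ ys ≠ [] then [temp ++ ys] else [] := by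
  induction ys with
  | nil => intro temp; simp [pvSplitAux]
  | cons t ts ih =>
    intro temp
    have ht : t ≠ -1 := fun he => h (he ▸ List.mem_cons_self ..)
    have hts : (-1 : Int) ∉ ts := fun hm => h (List.mem_cons_of_mem _ hm)
    simp only [pvSplitAux, if_neg ht]
    rw [ih hts]
    simp

lemma pvSplit_sep (pre suf : List Int) (h : (-1 : Int) ∉ pre) :
    ∀ temp, pvSplitAux (pre ++ (-1) :: suf) temp = (temp ++ pre) :: pvSplitAux suf [] := by
  induction pre with
  | nil => intro temp; simp [pvSplitAux]
  | cons p ps ih =>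
    intro temp
    have hp : p ≠ -1 := fun he => h (he ▸ List.mem_cons_self ..)
    have hps : (-1 : Int) ∉ ps := fun hm => h (List.mem_cons_of_mem _ hm)
    simp only [List.cons_append, pvSplitAux, if_neg hp]
    rw [ih hps]
    simp

lemma pvB_eq (ys : List Int) : unflatten_individual_alt ys = pvSplitAux ys [] := by
  fun_induction unflatten_individual_alt ys with
  | case1 ys i h ih =>
    obtain ⟨pre, suf, hys, hlen, hnm⟩ := (PySem.List.index?_eq_some_iff _ _ _).mp h
    have htake : PySem.List.slice ys none (some (i : Int)) = pre := by
      rw [PySem.List.slice_to_natCast, hys, ← hlen, List.take_left]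
    have hdrop : PySem.List.slice ys (some ((i : Int) + 1)) none = suf := by
      have : ((i : Int) + 1) = ((i + 1 : Nat) : Int) := by push_cast; ring
      rw [this, PySem.List.slice_from_natCast, hys, ← hlen]
      simp
    rw [hdrop] at ih
    rw [htake, hdrop, ih, hys, pvSplit_sep pre suf hnm []]
    simp
  | case2 ys h hne =>
    have hnm : (-1 : Int) ∉ ys := (PySem.List.index?_eq_none_iff _ _).mp h
    rw [pvSplit_no_sep ys hnm []]
    simp [hne]
  | case3 ys h hne =>
    have hnm : (-1 : Int) ∉ ys := (PySem.List.index?_eq_none_iff _ _).mp h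
    rw [pvSplit_no_sep ys hnm []]
    simp [not_not.mp hne]

-- ===== VERDICT (by name: the statement is the Claim_ definition above) =====
theorem unflatten_individual_spec : Claim_equal_unflatten_individual := by
  intro flattened _
  unfold Spec_unflatten_individual unflatten_individual
  rw [pvB_eq]
  simpa using pvA_eq flattened [] []
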